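-- pv_equiv track=rewrite | github.com/jimmynguyen/codesignal-challenges | challenges/magicalWell/python3/magicalWell.py | magicalWell
-- ===== SOURCE A (Python) =====
-- def magicalWell(a, b, n):
-- 	s = 0
-- 	while n > 0:
-- 		n -= 1
-- 		s += a*b
-- 		a += 1
-- 		b += 1
-- 	return s
-- ===== SOURCE B (Python) =====
-- def magicalWell(a, b, n):
-- 	if n <= 0:
-- 		return 0
-- 	return n*a*b + (a+b)*(n*(n-1)//2) + (n-1)*n*(2*n-1)//6
-- ===== Notes on version B (the rewrite author's own statement) =====
-- stated objective: faster
-- what changed: Replaced the O(n) accumulation loop by the closed-form sum n*a*b + (a+b)*Sum(k) + Sum(k^2) using the Gauss and square-pyramidal formulas.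
import Mathlib
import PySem

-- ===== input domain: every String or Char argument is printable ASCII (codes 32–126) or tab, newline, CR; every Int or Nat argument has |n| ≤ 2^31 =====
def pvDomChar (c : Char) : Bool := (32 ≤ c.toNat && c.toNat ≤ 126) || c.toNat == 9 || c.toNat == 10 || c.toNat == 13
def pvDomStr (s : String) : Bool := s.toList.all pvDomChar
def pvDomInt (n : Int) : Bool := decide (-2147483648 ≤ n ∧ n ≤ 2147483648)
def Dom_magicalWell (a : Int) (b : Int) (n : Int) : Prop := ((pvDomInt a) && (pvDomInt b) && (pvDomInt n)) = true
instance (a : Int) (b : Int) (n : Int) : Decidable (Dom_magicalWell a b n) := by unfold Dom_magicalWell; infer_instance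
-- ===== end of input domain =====

-- B replaces A's O(n) accumulation loop by the closed-form sum (Gauss + square-pyramidal formulas); objective: faster.

-- ===== PORT A =====
-- the while loop of A: state (a, b, n, s), one recursive call per iteration
def magicalWellGo (a : Int) (b : Int) (n : Int) (s : Int) : Int :=
  if n > 0 then magicalWellGo (a + 1) (b + 1) (n - 1) (s + a * b) else s
termination_by n.toNat
decreasing_by omega

def magicalWell (a : Int) (b : Int) (n : Int) : Int := magicalWellGo a b n 0

-- ===== PORT B =====
def magicalWell_alt (a : Int) (b : Int) (n : Int) : Int :=
  if n ≤ 0 then 0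
  else n * a * b + (a + b) * (n * (n - 1) / 2) + (n - 1) * n * (2 * n - 1) / 6

-- ===== PRECONDITION & SPEC =====
def Spec_magicalWell (a : Int) (b : Int) (n : Int) (out : Int) : Prop := out = magicalWell_alt a b n
instance (a : Int) (b : Int) (n : Int) (out : Int) : Decidable (Spec_magicalWell a b n out) := by unfold Spec_magicalWell; infer_instance

-- ===== CLAIM (what is proved, stated in full; the proofs are below) =====
def Claim_equal_magicalWell : Prop := ∀ (a : Int) (b : Int) (n : Int), Dom_magicalWell a b n → Spec_magicalWell a b n (magicalWell a b n)

-- ===== LEMMAS AND PROOFS =====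

-- exact divisibility facts behind B's two integer divisions
theorem two_dvd_mul_pred (n : Int) : (2 : Int) ∣ n * (n - 1) := by
  rcases Int.even_mul_succ_self (n - 1) with ⟨k, hk⟩
  exact ⟨k, by linarith⟩

theorem six_dvd_sq_pyramid (n : Int) : (6 : Int) ∣ (n - 1) * n * (2 * n - 1) := by
  obtain ⟨q, r, hr0, hr6, hn⟩ : ∃ q r : Int, 0 ≤ r ∧ r < 6 ∧ n = 6 * q + r :=
    ⟨n / 6, n % 6, Int.emod_nonneg _ (by norm_num), Int.emod_lt_of_pos _ (by norm_num),
      (Int.mul_ediv_add_emod n 6).symm⟩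
  subst hn
  interval_cases r
  · exact ⟨q * (6 * q - 1) * (12 * q - 1), by ring⟩
  · exact ⟨q * (6 * q + 1) * (12 * q + 1), by ring⟩
  · exact ⟨(6 * q + 1) * (3 * q + 1) * (4 * q + 1), by ring⟩
  · exact ⟨(3 * q + 1) * (2 * q + 1) * (12 * q + 5), by ring⟩
  · exact ⟨(2 * q + 1) * (3 * q + 2) * (12 * q + 7), by ring⟩
  · exact ⟨(3 * q + 2) * (6 * q + 5) * (4 * q + 3), by ring⟩

-- one unrolling of the closed form
theorem alt_step (a b n : Int) (hn : 0 < n) :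
    magicalWell_alt a b n = a * b + magicalWell_alt (a + 1) (b + 1) (n - 1) := by
  obtain ⟨k, hk⟩ := two_dvd_mul_pred n
  obtain ⟨k', hk'⟩ := two_dvd_mul_pred (n - 1)
  obtain ⟨j, hj⟩ := six_dvd_sq_pyramid n
  obtain ⟨j', hj'⟩ := six_dvd_sq_pyramid (n - 1)
  unfold magicalWell_alt
  by_cases h1 : n - 1 ≤ 0
  · have hn1 : n = 1 := by omega
    subst hn1; norm_num
  · rw [if_neg (by omega : ¬ n ≤ 0), if_neg h1, hk, hk', hj, hj',
      Int.mul_ediv_cancel_left _ (by norm_num : (2:Int) ≠ 0),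
      Int.mul_ediv_cancel_left _ (by norm_num : (2:Int) ≠ 0),
      Int.mul_ediv_cancel_left _ (by norm_num : (6:Int) ≠ 0),
      Int.mul_ediv_cancel_left _ (by norm_num : (6:Int) ≠ 0)]
    have h6 : 6 * (n * a * b + (a + b) * k + j) =
        6 * (a * b + ((n - 1) * (a + 1) * (b + 1) + (a + 1 + (b + 1)) * k' + j')) := by
      linear_combination (-(3 * (a + b))) * hk + (3 * (a + 1 + (b + 1))) * hk' - hj + hj'
    exact mul_left_cancel₀ (by norm_num : (6:Int) ≠ 0) h6

theorem go_eq (m : Nat) : ∀ (a b s n : Int), n.toNat = m → 0 ≤ n →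
    magicalWellGo a b n s = s + magicalWell_alt a b n := by
  induction m with
  | zero =>
    intro a b s n hm hn
    have : n = 0 := by omega
    subst this
    rw [magicalWellGo]
    simp [magicalWell_alt]
  | succ k ih =>
    intro a b s n hm hn
    have hpos : 0 < n := by omega
    rw [magicalWellGo]
    simp only [hpos, if_pos]
    rw [ih (a + 1) (b + 1) (s + a * b) (n - 1) (by omega) (by omega)]
    rw [alt_step a b n hpos]
    ring

-- ===== VERDICT (by name: the statement is the Claim_ definition above) =====
theorem magicalWell_spec : Claim_equal_magicalWell := by
  intro a b n _
  unfold Spec_magicalWell magicalWell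
  by_cases hn : 0 ≤ n
  · exact (go_eq n.toNat a b 0 n rfl hn).trans (by ring)
  · rw [magicalWellGo]
    simp [magicalWell_alt, show ¬ n > 0 by omega, show n ≤ 0 by omega]
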